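-- pv_equiv track=rewrite | github.com/atvKail/solve | USE/ПолноценноеРешениеВариантов/kEGE24_25/Gorbachev2v/2.py | generate_replacements
-- ===== SOURCE A (Python) =====
-- def generate_replacements(vals):
--     if not vals:
--         yield []
--         return
--     head, *tail = vals
--     if head == -1:
--         for bit in [0, 1]:
--             for rest in generate_replacements(tail):
--                 yield [bit] + rest
--     else:
--         for rest in generate_replacements(tail):
--             yield [head] + rest
-- ===== SOURCE B (Python) =====
-- def generate_replacements(vals):
--     base = list(vals)
--     idxs = [i for i, v in enumerate(base) if v == -1]
--     for m in range(2 ** len(idxs)):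
--         new = base[:]
--         t = m
--         for i in reversed(idxs):
--             new[i] = t % 2
--             t //= 2
--         yield new
-- ===== Notes on version B (the rewrite author's own statement) =====
-- stated objective: alternative
-- what changed: B replaces A's structural recursion over the list by one pass that collects the indices of -1 entries and then enumerates all 2^k assignments with an integer counter, writing the counter's bits into a copy of the base list (leftmost -1 = most significant bit).
import Mathlib
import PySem

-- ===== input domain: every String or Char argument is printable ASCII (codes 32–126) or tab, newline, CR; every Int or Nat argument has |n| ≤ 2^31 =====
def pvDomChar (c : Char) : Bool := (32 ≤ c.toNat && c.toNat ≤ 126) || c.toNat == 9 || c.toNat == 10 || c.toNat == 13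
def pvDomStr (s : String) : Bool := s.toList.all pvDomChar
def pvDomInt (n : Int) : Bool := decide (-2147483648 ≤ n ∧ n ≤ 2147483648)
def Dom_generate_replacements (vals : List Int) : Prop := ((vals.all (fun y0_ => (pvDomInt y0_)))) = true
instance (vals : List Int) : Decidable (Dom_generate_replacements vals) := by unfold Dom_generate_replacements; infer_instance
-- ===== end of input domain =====

-- B replaces A's structural recursion by index collection + bit enumeration; same asymptotic cost, alternative decomposition.
-- A is a Python generator; both ports return the list of all yielded values, in yield order.

-- ===== PORT A =====
-- literal transliteration of A's recursion: empty list yields [[]]; a -1 head expands to both bits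
def generate_replacements : List Int → List (List Int)
  | [] => [[]]
  | head :: tail =>
    if head = -1 then
      ([0, 1] : List Int).flatMap (fun bit => (generate_replacements tail).map (fun rest => bit :: rest))
    else
      (generate_replacements tail).map (fun rest => head :: rest)

-- ===== PORT B =====
-- helper for Source B's inner loop body: new[i] = t % 2; t //= 2   (state = (new, t))
def grStep (st : List Int × Int) (i : Int) : List Int × Int :=
  (PySem.List.pySetD st.1 i (PySem.Int.mod st.2 2), PySem.Int.floordiv st.2 2)

-- Source B: idxs = positions of -1 (via enumerate); for m in range(2**k): copy base, write bits right-to-left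
def generate_replacements_alt (vals : List Int) : List (List Int) :=
  let idxs : List Int :=
    (PySem.List.enumerate vals 0).filterMap (fun p => if p.2 = -1 then some p.1 else none)
  (PySem.List.pyRange 0 ((2 : Int) ^ idxs.length) 1).map
    (fun m => (idxs.reverse.foldl grStep (vals, m)).1)

-- ===== PRECONDITION & SPEC =====
def Spec_generate_replacements (vals : List Int) (out : List (List Int)) : Prop := out = generate_replacements_alt vals
instance (vals : List Int) (out : List (List Int)) : Decidable (Spec_generate_replacements vals out) := by unfold Spec_generate_replacements; infer_instance

-- ===== CLAIM (what is proved, stated in full; the proofs are below) =====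
def Claim_equal_generate_replacements : Prop := ∀ (vals : List Int), Dom_generate_replacements vals → Spec_generate_replacements vals (generate_replacements vals)

-- ===== LEMMAS AND PROOFS =====

-- the index list, generalized over the enumerate start
def grIdxs (s : Int) (vals : List Int) : List Int :=
  (PySem.List.enumerate vals s).filterMap (fun p => if p.2 = -1 then some p.1 else none)

theorem grIdxs_cons (s : Int) (h : Int) (t : List Int) :
    grIdxs s (h :: t) = if h = -1 then s :: grIdxs (s+1) t else grIdxs (s+1) t := by
  by_cases hh : h = -1 <;> simp [grIdxs, PySem.List.enumerate_cons, hh]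

theorem grIdxs_shift (s : Int) (t : List Int) :
    grIdxs (s+1) t = (grIdxs s t).map (· + 1) := by
  induction t generalizing s with
  | nil => simp [grIdxs, PySem.List.enumerate_nil]
  | cons h t ih =>
    rw [grIdxs_cons, grIdxs_cons]
    by_cases hh : h = -1 <;> simp [hh, ih (s+1), ih s]

theorem grIdxs_nonneg (s : Int) (t : List Int) (hs : 0 ≤ s) :
    ∀ i ∈ grIdxs s t, 0 ≤ i := by
  induction t generalizing s with
  | nil => simp [grIdxs, PySem.List.enumerate_nil]
  | cons h t ih =>
    rw [grIdxs_cons]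
    intro i hi
    by_cases hh : h = -1
    · rw [if_pos hh] at hi
      rcases List.mem_cons.mp hi with hi | hi
      · omega
      · exact ih (s+1) (by omega) i hi
    · rw [if_neg hh] at hi
      exact ih (s+1) (by omega) i hi

-- one step of Source B's inner loop on a cons cell, for a shifted (nonnegative+1) index
theorem grStep_shift (base : List Int) (h m i : Int) (hi : 0 ≤ i) :
    grStep (h :: base, m) (i + 1)
      = (h :: (grStep (base, m) i).1, (grStep (base, m) i).2) := by
  simp only [grStep]
  rw [PySem.List.pySetD_of_nonneg _ _ (by omega : (0:Int) ≤ i + 1),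
    PySem.List.pySetD_of_nonneg _ _ hi]
  have hn : (i + 1).toNat = i.toNat + 1 := by omega
  rw [hn]
  simp [List.set]

-- Lemma 1: assigning through shifted indices on (h :: base) leaves the head alone
theorem gr_shift_fold (L : List Int) (hL : ∀ i ∈ L, 0 ≤ i) :
    ∀ (base : List Int) (h m : Int),
    (L.map (· + 1)).foldl grStep (h :: base, m)
      = (h :: (L.foldl grStep (base, m)).1, (L.foldl grStep (base, m)).2) := by
  induction L with
  | nil => simp
  | cons i L ih =>
    intro base h m
    have hi : 0 ≤ i := hL i (by simp)
    simp only [List.map_cons, List.foldl_cons]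
    rw [grStep_shift base h m i hi]
    have := ih (fun j hj => hL j (by simp [hj])) (grStep (base, m) i).1 h (grStep (base, m) i).2
    simpa using this

-- Lemma 2: the counter after the fold is m // 2^(length)
theorem gr_counter (L : List Int) :
    ∀ (base : List Int) (m : Int),
    (L.foldl grStep (base, m)).2 = PySem.Int.floordiv m ((2:Int) ^ L.length) := by
  induction L with
  | nil =>
    intro base m
    simp [PySem.Int.floordiv_eq_ediv_of_pos (by norm_num : (0:Int) < 1)]
  | cons i L ih =>
    intro base m
    simp only [List.foldl_cons, ih]
    show PySem.Int.floordiv (PySem.Int.floordiv m 2) ((2:Int) ^ L.length)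
        = PySem.Int.floordiv m ((2:Int) ^ (i :: L).length)
    rw [PySem.Int.floordiv_eq_ediv_of_pos (by norm_num : (0:Int) < 2),
      PySem.Int.floordiv_eq_ediv_of_pos (by positivity : (0:Int) < (2:Int) ^ L.length),
      PySem.Int.floordiv_eq_ediv_of_pos (by positivity : (0:Int) < (2:Int) ^ (i :: L).length)]
    rw [Int.ediv_ediv_of_nonneg (by norm_num : (0:Int) ≤ 2)]
    norm_num [List.length_cons, pow_succ, mul_comm]

-- Lemma 3: the list result of the fold only depends on the counter modulo 2^(length)
theorem gr_mod_fold (L : List Int) :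
    ∀ (base : List Int) (m c : Int),
    (L.foldl grStep (base, m + c * (2:Int) ^ L.length)).1 = (L.foldl grStep (base, m)).1 := by
  induction L with
  | nil => simp
  | cons i L ih =>
    intro base m c
    have hmod : PySem.Int.mod (m + c * (2:Int) ^ (i :: L).length) 2 = PySem.Int.mod m 2 := by
      rw [PySem.Int.mod_eq_emod_of_pos (by norm_num : (0:Int) < 2),
        PySem.Int.mod_eq_emod_of_pos (by norm_num : (0:Int) < 2)]
      have he : m + c * (2:Int) ^ (i :: L).length = m + (c * 2 ^ L.length) * 2 := by
        simp [List.length_cons]; ring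
      rw [he]
      omega
    have hdiv : PySem.Int.floordiv (m + c * (2:Int) ^ (i :: L).length) 2
        = PySem.Int.floordiv m 2 + c * (2:Int) ^ L.length := by
      rw [PySem.Int.floordiv_eq_ediv_of_pos (by norm_num : (0:Int) < 2),
        PySem.Int.floordiv_eq_ediv_of_pos (by norm_num : (0:Int) < 2)]
      have he : m + c * (2:Int) ^ (i :: L).length = m + (c * 2 ^ L.length) * 2 := by
        simp [List.length_cons]; ring
      rw [he, Int.add_mul_ediv_right _ _ (by norm_num : (2:Int) ≠ 0)]
    simp only [List.foldl_cons, grStep, hmod, hdiv]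
    exact ih _ _ _

theorem gr_assign_cons_shift (I : List Int) (hI : ∀ i ∈ I, 0 ≤ i) (h m : Int) (t : List Int) :
    (((I.map (· + 1)).reverse).foldl grStep (h :: t, m)).1
      = h :: ((I.reverse).foldl grStep (t, m)).1 := by
  rw [← List.map_reverse]
  rw [gr_shift_fold I.reverse (fun i hi => hI i (List.mem_reverse.mp hi))]

theorem gr_assign_neg1 (I : List Int) (hI : ∀ i ∈ I, 0 ≤ i) (m : Int) (t : List Int) :
    (((0 :: I.map (· + 1)).reverse).foldl grStep ((-1 : Int) :: t, m)).1
      = PySem.Int.mod (PySem.Int.floordiv m ((2:Int) ^ I.length)) 2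
          :: ((I.reverse).foldl grStep (t, m)).1 := by
  rw [List.reverse_cons, List.foldl_append, ← List.map_reverse,
    gr_shift_fold I.reverse (fun i hi => hI i (List.mem_reverse.mp hi))]
  have hc := gr_counter I.reverse t m
  rw [List.length_reverse] at hc
  simp only [List.foldl_cons, List.foldl_nil, grStep, hc]
  rw [PySem.List.pySetD_of_nonneg _ _ (le_refl (0:Int))]
  simp [List.set]

theorem gr_alt_eq (vals : List Int) :
    generate_replacements_alt vals
      = (PySem.List.pyRange 0 ((2:Int) ^ (grIdxs 0 vals).length) 1).map
          (fun m => ((grIdxs 0 vals).reverse.foldl grStep (vals, m)).1) := rfl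

theorem gr_main (vals : List Int) :
    generate_replacements vals = generate_replacements_alt vals := by
  rw [gr_alt_eq]
  induction vals with
  | nil =>
    have h1 : PySem.List.pyRange 0 ((2:Int) ^ (grIdxs 0 ([] : List Int)).length) 1 = [0] := by
      decide
    simp [generate_replacements, h1, grIdxs, PySem.List.enumerate_nil]
  | cons h t ih =>
    have hnn : ∀ i ∈ grIdxs 0 t, 0 ≤ i := grIdxs_nonneg 0 t le_rfl
    have hsh0 : grIdxs (0+1) t = (grIdxs 0 t).map (· + 1) := grIdxs_shift 0 t
    by_cases hh : h = -1
    · have hsh : grIdxs 0 (h :: t) = (0:Int) :: (grIdxs 0 t).map (· + 1) := by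
        rw [grIdxs_cons, if_pos hh, hsh0]
      rw [hsh]
      set I := grIdxs 0 t with hIdef
      set k := I.length with hk
      have hlen : ((0:Int) :: I.map (· + 1)).length = k + 1 := by simp [hk]
      rw [hlen]
      have hpos : (0:Int) ≤ (2:Int) ^ k := by positivity
      have hsplit : PySem.List.pyRange 0 ((2:Int) ^ (k+1)) 1
          = PySem.List.pyRange 0 ((2:Int) ^ k) 1
            ++ PySem.List.pyRange ((2:Int) ^ k) ((2:Int) ^ (k+1)) 1 :=
        PySem.List.pyRange_one_append 0 ((2:Int) ^ k) ((2:Int) ^ (k+1)) hpos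
          (pow_le_pow_right₀ (by norm_num : (1:Int) ≤ 2) (Nat.le_succ k))
      rw [hsplit, List.map_append]
      rw [show generate_replacements (h :: t)
          = ([0, 1] : List Int).flatMap
              (fun bit => (generate_replacements t).map (fun rest => bit :: rest)) from by
        rw [generate_replacements, if_pos hh]]
      have hA : ([0, 1] : List Int).flatMap
            (fun bit => (generate_replacements t).map (fun rest => bit :: rest))
          = (generate_replacements t).map (fun rest => (0:Int) :: rest)
            ++ (generate_replacements t).map (fun rest => (1:Int) :: rest) := by
        simp [List.flatMap_cons]
      rw [hA, ih]
      subst hh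
      congr 1
      · -- first half: m ∈ [0, 2^k), leading bit 0
        rw [List.map_map]
        apply List.map_congr_left
        intro m hm
        rw [PySem.List.mem_pyRange_one] at hm
        simp only [Function.comp]
        rw [gr_assign_neg1 I hnn m t]
        have h0 : PySem.Int.floordiv m ((2:Int) ^ k) = 0 := by
          rw [PySem.Int.floordiv_eq_ediv_of_pos (by positivity : (0:Int) < (2:Int) ^ k)]
          exact Int.ediv_eq_zero_of_lt hm.1 hm.2
        rw [h0]
        norm_num [PySem.Int.mod_eq_emod_of_pos (by norm_num : (0:Int) < 2)]
      · -- second half: m = 2^k + r, leading bit 1, tail as for r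
        rw [List.map_map, PySem.List.pyRange_one ((2:Int) ^ k) ((2:Int) ^ (k+1)),
          PySem.List.pyRange_one 0 ((2:Int) ^ k), List.map_map]
        have hlen2 : (((2:Int) ^ (k+1)) - (2:Int) ^ k).toNat = ((2:Int) ^ k - 0).toNat := by
          have he : (2:Int) ^ (k+1) - 2 ^ k = 2 ^ k - 0 := by ring
          rw [he]
        rw [hlen2, List.map_map]
        apply List.map_congr_left
        intro j hj
        rw [List.mem_range] at hj
        have hr0 : (0:Int) ≤ (j:Int) := by positivity
        have hr : (j:Int) < (2:Int) ^ k := by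
          calc (j:Int) < ((((2:Int) ^ k - 0).toNat : Nat) : Int) := Int.ofNat_lt.mpr hj
            _ = (2:Int) ^ k := by rw [sub_zero, Int.toNat_of_nonneg hpos]
        simp only [Function.comp]
        rw [gr_assign_neg1 I hnn ((2:Int) ^ k + (j:Int)) t]
        have h1 : PySem.Int.floordiv ((2:Int) ^ k + (j:Int)) ((2:Int) ^ k) = 1 := by
          rw [PySem.Int.floordiv_eq_iff_of_pos (by positivity : (0:Int) < (2:Int) ^ k)]
          constructor
          · linarith
          · linarith
        have h2 : ((I.reverse).foldl grStep (t, (2:Int) ^ k + (j:Int))).1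
            = ((I.reverse).foldl grStep (t, (0:Int) + (j:Int))).1 := by
          have hck : (2:Int) ^ k + (j:Int) = ((0:Int) + (j:Int)) + 1 * (2:Int) ^ I.reverse.length := by
            rw [List.length_reverse, ← hk]; ring
          rw [hck, gr_mod_fold]
        rw [h1, h2]
        norm_num [PySem.Int.mod_eq_emod_of_pos (by norm_num : (0:Int) < 2)]
    · have hsh : grIdxs 0 (h :: t) = (grIdxs 0 t).map (· + 1) := by
        rw [grIdxs_cons, if_neg hh, hsh0]
      rw [hsh]
      rw [show generate_replacements (h :: t)
          = (generate_replacements t).map (fun rest => h :: rest) from by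
        rw [generate_replacements, if_neg hh]]
      rw [ih, List.length_map, List.map_map]
      apply List.map_congr_left
      intro m hm
      simp only [Function.comp]
      exact (gr_assign_cons_shift (grIdxs 0 t) hnn h m t).symm

-- ===== VERDICT (by name: the statement is the Claim_ definition above) =====
theorem generate_replacements_spec : Claim_equal_generate_replacements := by
  intro vals _
  show generate_replacements vals = generate_replacements_alt vals
  exact gr_main vals
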